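-- pv_equiv track=rewrite | github.com/AtticusAlan/PIcPickGame | pic_pick_1p_hard.py | genTail3
-- ===== SOURCE A (Python) =====
-- def genTail3(head_row, head_column, dir):
--     tail3 = []
--     # generate tail3 grids based on different direction
--     # arrow pointing up:
--     if dir == 'up':
--         tail3.append((head_row + 4, head_column - 1))
--         tail3.append((head_row + 4, head_column + 1))
--         for i in range(1,3):
--             tail3.append((head_row + 2, head_column - i))
--             tail3.append((head_row + 2, head_column + i))
--         for j in range(1,4):
--             tail3.append((head_row + j, head_column))
--     # arrow pointing down:
--     elif dir == 'down':
--         tail3.append((head_row - 4, head_column - 1))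
--         tail3.append((head_row - 4, head_column + 1))
--         for i in range(1,3):
--             tail3.append((head_row - 2, head_column - i))
--             tail3.append((head_row - 2, head_column + i))
--         for j in range(1,4):
--             tail3.append((head_row - j, head_column))
--     elif dir == 'left':
--         tail3.append((head_row - 1, head_column + 4))
--         tail3.append((head_row + 1, head_column + 4))
--         for i in range(1,3):
--             tail3.append((head_row - i, head_column + 2))
--             tail3.append((head_row + i, head_column + 2))
--         for j in range(1,4):
--             tail3.append((head_row, head_column + j))
--     else: # right
--         tail3.append((head_row - 1, head_column - 4))
--         tail3.append((head_row + 1, head_column - 4))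
--         for i in range(1,3):
--             tail3.append((head_row - i, head_column - 2))
--             tail3.append((head_row + i, head_column - 2))
--         for j in range(1,4):
--             tail3.append((head_row, head_column - j))
--     return tail3
-- ===== SOURCE B (Python) =====
-- def genTail3(head_row, head_column, dir):
--     # direction -> (forward unit vector f, sideways unit vector s)
--     vecs = {
--         'up':   ((1, 0), (0, 1)),
--         'down': ((-1, 0), (0, 1)),
--         'left': ((0, 1), (1, 0)),
--     }
--     (fr, fc), (sr, sc) = vecs.get(dir, ((0, -1), (1, 0)))  # default: right
--     # coefficients (a, b) meaning head + a*f + b*s, in the original emit order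
--     coeffs = [(4, -1), (4, 1), (2, -1), (2, 1), (2, -2), (2, 2), (1, 0), (2, 0), (3, 0)]
--     return [(head_row + a * fr + b * sr, head_column + a * fc + b * sc) for a, b in coeffs]
-- ===== Notes on version B (the rewrite author's own statement) =====
-- stated objective: simpler
-- what changed: Replaces four copy-pasted per-direction branches by a direction->unit-vector table and one shared coefficient list mapped over once, emitting the points in the same order.
import Mathlib
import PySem

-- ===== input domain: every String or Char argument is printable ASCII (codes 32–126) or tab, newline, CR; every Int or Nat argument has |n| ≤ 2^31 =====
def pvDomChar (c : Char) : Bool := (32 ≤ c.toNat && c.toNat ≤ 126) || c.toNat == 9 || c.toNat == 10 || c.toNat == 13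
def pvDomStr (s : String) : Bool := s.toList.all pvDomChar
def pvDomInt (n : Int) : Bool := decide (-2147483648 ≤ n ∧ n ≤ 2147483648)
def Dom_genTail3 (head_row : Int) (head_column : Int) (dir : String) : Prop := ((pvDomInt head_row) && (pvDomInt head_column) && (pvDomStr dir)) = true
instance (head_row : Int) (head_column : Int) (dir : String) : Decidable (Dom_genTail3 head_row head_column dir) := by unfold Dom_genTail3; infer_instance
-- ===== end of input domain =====

-- B replaces A's four copied direction branches by a direction->unit-vector table and one shared coefficient list (same output, same order); objective: simpler.


-- ===== PORT A =====
def genTail3 (head_row : Int) (head_column : Int) (dir : String) : List (Int × Int) :=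
  -- literal transliteration of A: four branches, appends in source order
  if dir = "up" then
    let t := [(head_row + 4, head_column - 1), (head_row + 4, head_column + 1)]
    let t := (PySem.List.pyRange 1 3 1).foldl (fun acc i => acc ++ [(head_row + 2, head_column - i), (head_row + 2, head_column + i)]) t
    (PySem.List.pyRange 1 4 1).foldl (fun acc j => acc ++ [(head_row + j, head_column)]) t
  else if dir = "down" then
    let t := [(head_row - 4, head_column - 1), (head_row - 4, head_column + 1)]
    let t := (PySem.List.pyRange 1 3 1).foldl (fun acc i => acc ++ [(head_row - 2, head_column - i), (head_row - 2, head_column + i)]) t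
    (PySem.List.pyRange 1 4 1).foldl (fun acc j => acc ++ [(head_row - j, head_column)]) t
  else if dir = "left" then
    let t := [(head_row - 1, head_column + 4), (head_row + 1, head_column + 4)]
    let t := (PySem.List.pyRange 1 3 1).foldl (fun acc i => acc ++ [(head_row - i, head_column + 2), (head_row + i, head_column + 2)]) t
    (PySem.List.pyRange 1 4 1).foldl (fun acc j => acc ++ [(head_row, head_column + j)]) t
  else
    let t := [(head_row - 1, head_column - 4), (head_row + 1, head_column - 4)]
    let t := (PySem.List.pyRange 1 3 1).foldl (fun acc i => acc ++ [(head_row - i, head_column - 2), (head_row + i, head_column - 2)]) t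
    (PySem.List.pyRange 1 4 1).foldl (fun acc j => acc ++ [(head_row, head_column - j)]) t

-- ===== PORT B =====
-- B: direction -> (forward unit vector, sideways unit vector)
def tailVecs : PySem.Dict String ((Int × Int) × (Int × Int)) :=
  PySem.Dict.ofList [("up", ((1, 0), (0, 1))), ("down", ((-1, 0), (0, 1))), ("left", ((0, 1), (1, 0)))]

def genTail3_alt (head_row : Int) (head_column : Int) (dir : String) : List (Int × Int) :=
  -- B: look up the vector pair (default = right), then one shared coefficient map
  let p := tailVecs.getD dir ((0, -1), (1, 0))
  let fr := p.1.1; let fc := p.1.2; let sr := p.2.1; let sc := p.2.2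
  let coeffs : List (Int × Int) := [(4, -1), (4, 1), (2, -1), (2, 1), (2, -2), (2, 2), (1, 0), (2, 0), (3, 0)]
  coeffs.map (fun ab => (head_row + ab.1 * fr + ab.2 * sr, head_column + ab.1 * fc + ab.2 * sc))

-- ===== PRECONDITION & SPEC =====
def Spec_genTail3 (head_row : Int) (head_column : Int) (dir : String) (out : List (Int × Int)) : Prop := out = genTail3_alt head_row head_column dir
instance (head_row : Int) (head_column : Int) (dir : String) (out : List (Int × Int)) : Decidable (Spec_genTail3 head_row head_column dir out) := by unfold Spec_genTail3; infer_instance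

-- ===== CLAIM (what is proved, stated in full; the proofs are below) =====
def Claim_equal_genTail3 : Prop := ∀ (head_row : Int) (head_column : Int) (dir : String), Dom_genTail3 head_row head_column dir → Spec_genTail3 head_row head_column dir (genTail3 head_row head_column dir)

-- ===== LEMMAS AND PROOFS =====

-- getD on the literal direction table, for each of the four cases
lemma tailVecs_up : tailVecs.getD "up" ((0, -1), (1, 0)) = ((1, 0), (0, 1)) := by decide

lemma tailVecs_down : tailVecs.getD "down" ((0, -1), (1, 0)) = ((-1, 0), (0, 1)) := by decide

lemma tailVecs_left : tailVecs.getD "left" ((0, -1), (1, 0)) = ((0, 1), (1, 0)) := by decide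

lemma tailVecs_default (dir : String) (h1 : ¬ dir = "up") (h2 : ¬ dir = "down")
    (h3 : ¬ dir = "left") : tailVecs.getD dir ((0, -1), (1, 0)) = ((0, -1), (1, 0)) := by
  have hi : tailVecs.items =
      [("up", ((1, 0), (0, 1))), ("down", ((-1, 0), (0, 1))), ("left", ((0, 1), (1, 0)))] := by
    decide
  have e1 : ("up" == dir) = false := by simp [Ne.symm h1]
  have e2 : ("down" == dir) = false := by simp [Ne.symm h2]
  have e3 : ("left" == dir) = false := by simp [Ne.symm h3]
  simp [PySem.Dict.getD_eq_get?_getD, PySem.Dict.get?, hi, List.find?, e1, e2, e3]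

-- ===== VERDICT (by name: the statement is the Claim_ definition above) =====
theorem genTail3_spec : Claim_equal_genTail3 := by
  intro head_row head_column dir _
  unfold Spec_genTail3 genTail3 genTail3_alt
  by_cases h1 : dir = "up"
  · simp only [h1, tailVecs_up]; norm_num [PySem.List.pyRange, List.range_succ, sub_eq_add_neg, (by decide : Int.toNat 2 = 2), (by decide : Int.toNat 3 = 3)]
  · by_cases h2 : dir = "down"
    · simp only [h2, if_neg (by decide : ¬ ("down" : String) = "up"), tailVecs_down]
      norm_num [PySem.List.pyRange, List.range_succ, sub_eq_add_neg, (by decide : Int.toNat 2 = 2), (by decide : Int.toNat 3 = 3)]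
    · by_cases h3 : dir = "left"
      · simp only [h3, if_neg (by decide : ¬ ("left" : String) = "up"),
          if_neg (by decide : ¬ ("left" : String) = "down"), tailVecs_left]
        norm_num [PySem.List.pyRange, List.range_succ, sub_eq_add_neg, (by decide : Int.toNat 2 = 2), (by decide : Int.toNat 3 = 3)]
      · simp only [if_neg h1, if_neg h2, if_neg h3, tailVecs_default dir h1 h2 h3]
        norm_num [PySem.List.pyRange, List.range_succ, sub_eq_add_neg, (by decide : Int.toNat 2 = 2), (by decide : Int.toNat 3 = 3)]
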